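-- pv_equiv track=rewrite | github.com/jopezizi/tira1 | viikko_9/keycode.py | find_codes
-- ===== SOURCE A (Python) =====
-- import itertools
--
-- def find_codes(pattern):
--     used = {n for n in pattern if n!= '?'}
--     available = [str(c) for c in range(1,10) if c not in used]
--
--     blank = pattern.count('?')
--     if blank == 0:
--         return [pattern]
--
--     result = []
--     for p in itertools.permutations(available, blank):
--         chars = list(pattern)
--         curr = 0
--
--         for i in range(len(chars)):
--             if chars[i] == '?':
--                 if p[curr] not in used:
--                     chars[i] = p[curr]
--                     curr +=1
--         if '?' not in chars:
--             result.append(''.join(chars))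
--
--     result.sort()
--     return result
-- ===== SOURCE B (Python) =====
-- def find_codes(pattern):
--     if '?' not in pattern:
--         return [pattern]
--     available = [str(d) for d in range(1, 10) if str(d) not in pattern]
--     # one left-to-right sweep; each state is (filled prefix as char list, digits still available)
--     states = [([], available)]
--     for c in pattern:
--         if c != '?':
--             for p, _ in states:
--                 p.append(c)
--         else:
--             states = [(p + [d], [x for x in av if x != d]) for p, av in states for d in av]
--     return [''.join(p) for p, _ in states]
-- ===== Notes on version B (the rewrite author's own statement) =====
-- stated objective: faster
-- what changed: A enumerates every r-permutation of ALL nine digits, re-scans the whole pattern once per permutation to discard tuples containing a used digit, and sorts at the end; B returns early when the pattern has no blanks and otherwise makes one left-to-right sweep over the pattern maintaining the list of valid partial fillings (only still-unused digits, tried in ascending order), so results come out already sorted with no final sort.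
import Mathlib
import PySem

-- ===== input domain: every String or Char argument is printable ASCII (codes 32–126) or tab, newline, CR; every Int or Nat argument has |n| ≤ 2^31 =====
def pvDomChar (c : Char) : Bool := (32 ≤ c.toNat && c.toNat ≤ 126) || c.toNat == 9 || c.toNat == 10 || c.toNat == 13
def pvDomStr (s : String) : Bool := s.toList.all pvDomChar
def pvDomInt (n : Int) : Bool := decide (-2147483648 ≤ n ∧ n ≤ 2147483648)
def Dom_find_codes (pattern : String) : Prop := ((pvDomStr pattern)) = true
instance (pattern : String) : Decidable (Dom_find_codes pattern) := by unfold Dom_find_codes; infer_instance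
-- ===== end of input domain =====

-- B replaces A's scan over ALL permutations of the nine digits (discarding the invalid ones, then sorting)
-- by recursive backtracking over the pattern that only ever places unused digits, emitting the results
-- already in sorted order; objective: faster.

-- ===== PORT A =====
-- Python's `c in used` with c an int and used a set of 1-char strings: int == str is always False in Python
def pvIntInCharSet (_c : Int) (used : List Char) : Bool := used.any (fun _ => false)

-- `str(c)` for c drawn from range(1,10): the single digit character (exact for 1 ≤ c ≤ 9)
def pvDigitChar (c : Int) : Char := Char.ofNat (48 + c.toNat)

-- the inner `for i in range(len(chars))` loop of A: structural recursion over the remaining chars,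
-- carrying the running index `curr` into the tuple p; `p[curr]` is read with pyGetD (the default is
-- never consulted: every reachable access has curr < p.length, see lemma pvFillA_eq below)
def pvFillA (cs : List Char) (p : List Char) (used : PySem.Set Char) (curr : Nat) : List Char :=
  match cs with
  | [] => []
  | c :: r =>
    if c = '?' then
      if !(PySem.Set.contains used (PySem.List.pyGetD p (curr : Int) '?')) then
        PySem.List.pyGetD p (curr : Int) '?' :: pvFillA r p used (curr + 1)
      else c :: pvFillA r p used curr
    else c :: pvFillA r p used curr

def find_codes (pattern : String) : List String :=
  let used : PySem.Set Char := PySem.Set.ofList (pattern.toList.filter (fun n => n ≠ '?'))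
  let available : List Char :=
    ((PySem.List.pyRange 1 10 1).filter (fun c => !(pvIntInCharSet c used))).map pvDigitChar
  let blank : Nat := PySem.Str.count pattern "?"
  if blank = 0 then [pattern]
  else
    let result : List String :=
      (PySem.List.permutations available blank).foldl
        (fun result p =>
          let chars := pvFillA pattern.toList p used 0
          if '?' ∉ chars then result ++ [String.ofList chars] else result)
        []
    PySem.List.sorted result (fun x => x)

-- ===== PORT B =====
-- B's sweep step: extend every partial filling by the next pattern char
def pvStepB (states : List (List Char × List Char)) (c : Char) : List (List Char × List Char) :=
  if c ≠ '?' then states.map (fun s => (s.1 ++ [c], s.2))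
  else states.flatMap (fun s => s.2.map (fun d => (s.1 ++ [d], s.2.filter (fun x => x ≠ d))))

def find_codes_alt (pattern : String) : List String :=
  if !(pattern.toList.contains '?') then [pattern]
  else
    -- `str(d) not in pattern`: substring test, exact as char membership for a 1-char needle
    let available : List Char := "123456789".toList.filter (fun d => !(pattern.toList.contains d))
    ((pattern.toList.foldl pvStepB [([], available)]).map Prod.fst).map String.ofList

-- ===== PRECONDITION & SPEC =====
def Spec_find_codes (pattern : String) (out : List String) : Prop := out = find_codes_alt pattern
instance (pattern : String) (out : List String) : Decidable (Spec_find_codes pattern out) := by unfold Spec_find_codes; infer_instance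

-- ===== CLAIM (what is proved, stated in full; the proofs are below) =====
def Claim_equal_find_codes : Prop := ∀ (pattern : String), Dom_find_codes pattern → Spec_find_codes pattern (find_codes pattern)

-- ===== LEMMAS AND PROOFS =====

-- spec of B's sweep: the recursive backtracking tree, used to reason about the fold
def pvBuildB (cs : List Char) (avail : List Char) : List (List Char) :=
  match cs with
  | [] => [[]]
  | c :: r =>
    if c ≠ '?' then (pvBuildB r avail).map (fun s => c :: s)
    else avail.flatMap (fun d => (pvBuildB r (avail.filter (fun x => x ≠ d))).map (fun s => d :: s))

-- the nine digit characters
def pvD9 : List Char := ['1', '2', '3', '4', '5', '6', '7', '8', '9']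

-- the "pure" filling: replace the '?' of cs in order by the elements of q (keep '?' once q runs out)
def pvFillW (cs : List Char) (q : List Char) : List Char :=
  match cs with
  | [] => []
  | c :: r => if c = '?' then q.headD '?' :: pvFillW r q.tail else c :: pvFillW r q

theorem pvFillA_success (cs : List Char) (used : PySem.Set Char) (p : List Char) (curr : Nat)
    (hq : ∀ d, d ∈ '?' :: p.drop curr → d ∉ used) :
    pvFillA cs p used curr = pvFillW cs (p.drop curr) := by
  induction cs generalizing curr with
  | nil => rfl
  | cons c r ih =>
    by_cases hc : c = '?'
    · subst hc
      have hd : PySem.List.pyGetD p (curr : Int) '?' = (p.drop curr).headD '?' := by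
        rw [PySem.List.pyGetD_natCast]
        rw [List.getD_eq_getElem?_getD, ← List.head?_drop, List.headD_eq_head?_getD]
      have hmem : (p.drop curr).headD '?' ∉ used := by
        cases hdrop : p.drop curr with
        | nil => simpa using hq '?' (by simp)
        | cons a t => exact hq a (by simp [hdrop])
      have hcontains : PySem.Set.contains used ((p.drop curr).headD '?') = false := by
        cases hb : PySem.Set.contains used ((p.drop curr).headD '?') with
        | false => rfl
        | true => exact absurd ((PySem.Set.contains_iff used _).mp hb) hmem
      have htail : ∀ d, d ∈ '?' :: p.drop (curr + 1) → d ∉ used := by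
        intro d hdm
        rcases List.mem_cons.mp hdm with h1 | h2
        · exact h1 ▸ hq '?' (by simp)
        · rw [← List.tail_drop] at h2
          exact hq d (List.mem_cons_of_mem _ (List.mem_of_mem_tail h2))
      show (if !(PySem.Set.contains used (PySem.List.pyGetD p (curr : Int) '?')) then _ else _) = _
      rw [hd, hcontains]
      simp only [Bool.not_false, if_true, pvFillW]
      rw [ih (curr + 1) htail, List.tail_drop]
    · show (if c = '?' then _ else _) = _
      rw [if_neg hc]
      show c :: pvFillA r p used curr = pvFillW (c :: r) (p.drop curr)
      rw [ih curr hq]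
      simp [pvFillW, hc]

theorem pvFillW_no_q (cs q : List Char) (hlen : cs.count '?' ≤ q.length)
    (hq : ∀ d ∈ q, d ≠ '?') : '?' ∉ pvFillW cs q := by
  induction cs generalizing q with
  | nil => simp [pvFillW]
  | cons c r ih =>
    by_cases hc : c = '?'
    · subst hc
      have hcount : ('?' :: r).count '?' = r.count '?' + 1 := by simp
      rw [hcount] at hlen
      cases q with
      | nil => simp at hlen
      | cons a t =>
        simp only [pvFillW, List.headD_cons, List.tail_cons]
        intro hm
        rcases List.mem_cons.mp hm with h1 | h2
        · exact hq a (by simp) h1.symm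
        · exact ih t (by simpa using Nat.le_of_succ_le_succ hlen)
            (fun d hd => hq d (List.mem_cons_of_mem _ hd)) h2
    · simp only [pvFillW, if_neg hc]
      intro hm
      rcases List.mem_cons.mp hm with h1 | h2
      · exact hc h1.symm
      · exact ih q (by simpa [List.count_cons, hc] using hlen) hq h2

theorem pvFillA_fail (cs : List Char) (used : PySem.Set Char) (p : List Char) (curr : Nat)
    (hlen : p.length - curr ≤ cs.count '?') (hex : ∃ d ∈ p.drop curr, d ∈ used) :
    '?' ∈ pvFillA cs p used curr := by
  induction cs generalizing curr with
  | nil =>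
    obtain ⟨d, hd, _⟩ := hex
    have : p.drop curr ≠ [] := List.ne_nil_of_mem hd
    have h1 : 0 < p.length - curr := by
      rcases Nat.lt_or_ge curr p.length with h | h
      · omega
      · exact absurd (List.drop_eq_nil_of_le h) this
    simp at hlen; omega
  | cons c r ih =>
    by_cases hc : c = '?'
    · subst hc
      obtain ⟨d, hd, hdu⟩ := hex
      have hne : p.drop curr ≠ [] := List.ne_nil_of_mem hd
      have hcurr : curr < p.length := by
        by_contra h
        exact hne (List.drop_eq_nil_of_le (by omega))
      have hdrop : p.drop curr = p[curr] :: p.drop (curr + 1) :=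
        List.drop_eq_getElem_cons hcurr
      have hget : PySem.List.pyGetD p (curr : Int) '?' = p[curr] := by
        rw [PySem.List.pyGetD_natCast, List.getD_eq_getElem?_getD]
        simp [List.getElem?_eq_getElem hcurr]
      show '?' ∈ (if !(PySem.Set.contains used (PySem.List.pyGetD p (curr : Int) '?')) then _ else _)
      by_cases hu : p[curr] ∈ used
      · have : PySem.Set.contains used (PySem.List.pyGetD p (curr : Int) '?') = true := by
          rw [hget]; exact (PySem.Set.contains_iff used _).mpr hu
        rw [this]
        simp
      · have : PySem.Set.contains used (PySem.List.pyGetD p (curr : Int) '?') = false := by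
          rw [hget]
          cases hb : PySem.Set.contains used p[curr] with
          | false => rfl
          | true => exact absurd ((PySem.Set.contains_iff used _).mp hb) hu
        rw [this]
        simp only [Bool.not_false, if_true]
        refine List.mem_cons_of_mem _ (ih (curr + 1) (by simp at hlen ⊢; omega) ?_)
        refine ⟨d, ?_, hdu⟩
        rw [hdrop] at hd
        rcases List.mem_cons.mp hd with h1 | h2
        · exact absurd (h1 ▸ hdu) hu
        · exact h2
    · show '?' ∈ (if c = '?' then _ else _)
      rw [if_neg hc]
      exact List.mem_cons_of_mem _ (ih curr (by simpa [List.count_cons, hc] using hlen) hex)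

theorem pvFillW_inj (cs q1 q2 : List Char) (h1 : q1.length = cs.count '?')
    (h2 : q2.length = cs.count '?') (he : pvFillW cs q1 = pvFillW cs q2) : q1 = q2 := by
  induction cs generalizing q1 q2 with
  | nil =>
    simp at h1 h2
    rw [h1, h2]
  | cons c r ih =>
    by_cases hc : c = '?'
    · subst hc
      simp only [List.count_cons_self] at h1 h2
      cases q1 with
      | nil => simp at h1
      | cons a t1 =>
        cases q2 with
        | nil => simp at h2
        | cons b t2 =>
          simp [pvFillW] at he
          have := ih t1 t2 (by simpa using h1) (by simpa using h2) he.2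
          rw [he.1, this]
    · simp only [pvFillW, if_neg hc, List.cons.injEq] at he
      exact ih q1 q2 (by simpa [List.count_cons, hc] using h1)
        (by simpa [List.count_cons, hc] using h2) he.2

theorem pvPerms_unfold (xs : List Char) (r : Nat) :
    PySem.List.permutations xs (r + 1) =
      (List.range xs.length).flatMap
        (fun i => match xs[i]? with
          | none => []
          | some x => (PySem.List.permutations (xs.eraseIdx i) r).map (x :: ·)) := by
  rw [PySem.List.permutations]
  congr 1
  funext i
  cases xs[i]? <;> rfl

theorem pvMem_perms (r : Nat) (xs p : List Char) (hx : xs.Nodup) :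
    p ∈ PySem.List.permutations xs r ↔ p.length = r ∧ p.Nodup ∧ ∀ d ∈ p, d ∈ xs := by
  induction r generalizing xs p with
  | zero =>
    rw [PySem.List.permutations_zero]
    constructor
    · intro h
      simp at h
      subst h
      simp
    · rintro ⟨hl, -, -⟩
      simp [List.length_eq_zero_iff.mp hl]
  | succ r ih =>
    rw [pvPerms_unfold]
    simp only [List.mem_flatMap, List.mem_range]
    constructor
    · rintro ⟨i, hi, hp⟩
      rw [List.getElem?_eq_getElem hi] at hp
      simp only at hp
      obtain ⟨p', hp', rfl⟩ := List.mem_map.mp hp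
      obtain ⟨hl, hnd', hmem'⟩ := (ih (xs.eraseIdx i) p' (hx.eraseIdx i)).mp hp'
      have hmer : ∀ d ∈ p', d ∈ xs.erase xs[i] := by
        intro d hd
        rw [hx.erase_getElem i hi]
        exact hmem' d hd
      refine ⟨by simp [hl], ?_, ?_⟩
      · refine List.nodup_cons.mpr ⟨?_, hnd'⟩
        intro hmm
        exact ((hx.mem_erase_iff).mp (hmer _ hmm)).1 rfl
      · intro d hd
        rcases List.mem_cons.mp hd with h1 | h2
        · exact h1 ▸ List.getElem_mem hi
        · exact ((hx.mem_erase_iff).mp (hmer d h2)).2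
    · rintro ⟨hl, hnd, hmem⟩
      cases p with
      | nil => simp at hl
      | cons a t =>
        obtain ⟨i, hi, hia⟩ := List.getElem_of_mem (hmem a (by simp))
        refine ⟨i, hi, ?_⟩
        rw [List.getElem?_eq_getElem hi]
        simp only
        refine List.mem_map.mpr ⟨t, ?_, by rw [hia]⟩
        refine (ih (xs.eraseIdx i) t (hx.eraseIdx i)).mpr
          ⟨by simpa using hl, (List.nodup_cons.mp hnd).2, ?_⟩
        intro d hd
        rw [← hx.erase_getElem i hi]
        refine (hx.mem_erase_iff).mpr ⟨?_, hmem d (List.mem_cons_of_mem _ hd)⟩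
        rw [hia]
        intro hda
        exact (List.nodup_cons.mp hnd).1 (hda ▸ hd)

theorem pvNodup_perms (r : Nat) (xs : List Char) (hx : xs.Nodup) :
    (PySem.List.permutations xs r).Nodup := by
  induction r generalizing xs with
  | zero => rw [PySem.List.permutations_zero]; simp
  | succ r ih =>
    rw [pvPerms_unfold]
    rw [List.nodup_flatMap]
    constructor
    · intro i hi
      rw [List.mem_range] at hi
      rw [List.getElem?_eq_getElem hi]
      simp only
      exact (ih (xs.eraseIdx i) (hx.eraseIdx i)).map
        (fun a b h => by injection h)
    · refine List.pairwise_lt_range.imp_of_mem ?_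
      intro i j hi hj hij
      rw [List.mem_range] at hi hj
      rw [Function.onFun]
      rw [List.getElem?_eq_getElem hi, List.getElem?_eq_getElem hj]
      simp only
      intro a hai haj
      obtain ⟨p1, -, rfl⟩ := List.mem_map.mp hai
      obtain ⟨p2, -, he⟩ := List.mem_map.mp haj
      have : xs[j] = xs[i] := by injection he with h1 h2
      exact absurd ((hx.getElem_inj_iff).mp this) (Nat.ne_of_lt hij).symm

theorem pvMem_buildB (cs : List Char) (avail : List Char) (ha : avail.Nodup) (s : List Char) :
    s ∈ pvBuildB cs avail ↔
      ∃ q, s = pvFillW cs q ∧ q.length = cs.count '?' ∧ q.Nodup ∧ ∀ d ∈ q, d ∈ avail := by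
  induction cs generalizing avail s with
  | nil =>
    show s ∈ [([] : List Char)] ↔ _
    simp only [List.mem_singleton]
    constructor
    · rintro rfl
      exact ⟨[], rfl, by simp [pvFillW], List.nodup_nil, by simp⟩
    · rintro ⟨q, rfl, hl, -, -⟩
      rfl
  | cons c r ih =>
    by_cases hc : c = '?'
    · subst hc
      show s ∈ List.flatMap _ _ ↔ _
      simp only [List.mem_flatMap, List.mem_map]
      constructor
      · rintro ⟨d, hd, s', hs', rfl⟩
        obtain ⟨q', rfl, hl, hnd, hmem⟩ :=
          (ih (avail.filter (fun x => x ≠ d)) (ha.filter _) s').mp hs'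
        refine ⟨d :: q', by simp [pvFillW], by simp [hl], ?_, ?_⟩
        · refine List.nodup_cons.mpr ⟨fun hdm => ?_, hnd⟩
          have := List.mem_filter.mp (hmem d hdm)
          simp at this
        · intro e he
          rcases List.mem_cons.mp he with h1 | h2
          · exact h1 ▸ hd
          · exact (List.mem_filter.mp (hmem e h2)).1
      · rintro ⟨q, rfl, hl, hnd, hmem⟩
        cases q with
        | nil => simp at hl
        | cons d q' =>
          refine ⟨d, hmem d (by simp), pvFillW r q', ?_, by simp [pvFillW]⟩
          refine (ih (avail.filter (fun x => x ≠ d)) (ha.filter _) _).mpr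
            ⟨q', rfl, by simpa using hl, (List.nodup_cons.mp hnd).2, ?_⟩
          intro e he
          refine List.mem_filter.mpr ⟨hmem e (List.mem_cons_of_mem _ he), ?_⟩
          simp only [decide_eq_true_eq]
          intro hed
          exact (List.nodup_cons.mp hnd).1 (hed ▸ he)
    · show s ∈ (if c ≠ '?' then _ else _) ↔ _
      rw [if_pos hc]
      simp only [List.mem_map]
      constructor
      · rintro ⟨s', hs', rfl⟩
        obtain ⟨q, rfl, hl, hnd, hmem⟩ := (ih avail ha s').mp hs'
        exact ⟨q, by simp [pvFillW, hc], by simpa [List.count_cons, hc] using hl, hnd, hmem⟩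
      · rintro ⟨q, rfl, hl, hnd, hmem⟩
        refine ⟨pvFillW r q, (ih avail ha _).mpr
          ⟨q, rfl, by simpa [List.count_cons, hc] using hl, hnd, hmem⟩, by simp [pvFillW, hc]⟩

theorem pvPairwise_buildB (cs avail : List Char) (ha : avail.Pairwise (· < ·)) :
    (pvBuildB cs avail).Pairwise (· < ·) := by
  induction cs generalizing avail with
  | nil => simp [pvBuildB]
  | cons c r ih =>
    by_cases hc : c = '?'
    · subst hc
      show ((if ('?' : Char) ≠ '?' then _ else _) : List (List Char)).Pairwise _
      rw [if_neg (by simp)]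
      rw [List.flatMap_def]
      rw [List.pairwise_flatten]
      refine ⟨?_, ?_⟩
      · intro l hl
        obtain ⟨d, -, rfl⟩ := List.mem_map.mp hl
        exact List.Pairwise.map _ (fun a b hab => List.cons_lt_cons_iff.mpr (Or.inr ⟨rfl, hab⟩))
          (ih _ (ha.filter _))
      · rw [List.pairwise_map]
        refine ha.imp_of_mem ?_
        intro d e _ _ hde x hx y hy
        obtain ⟨x', -, rfl⟩ := List.mem_map.mp hx
        obtain ⟨y', -, rfl⟩ := List.mem_map.mp hy
        exact List.cons_lt_cons_iff.mpr (Or.inl hde)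
    · show ((if c ≠ '?' then _ else _) : List (List Char)).Pairwise _
      rw [if_pos hc]
      exact List.Pairwise.map _ (fun a b hab => List.cons_lt_cons_iff.mpr (Or.inr ⟨rfl, hab⟩))
        (ih avail ha)

theorem pvCount_go (l : List Char) (fuel acc : Nat) (h : l.length ≤ fuel) :
    PySem.Chars.count.go ['?'] fuel l acc = acc + l.count '?' := by
  induction l generalizing fuel acc with
  | nil =>
    cases fuel <;> simp [PySem.Chars.count.go]
  | cons a t ih =>
    cases fuel with
    | zero => simp at h
    | succ f =>
      have hunf : PySem.Chars.count.go ['?'] (f + 1) (a :: t) acc =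
          if ['?'].isPrefixOf (a :: t) then
            PySem.Chars.count.go ['?'] f ((a :: t).drop (['?'] : List Char).length) (acc + 1)
          else PySem.Chars.count.go ['?'] f t acc := by
        rw [PySem.Chars.count.go]
      rw [hunf]
      by_cases hq : a = '?'
      · subst hq
        rw [if_pos (by simp [List.isPrefixOf])]
        simp only [List.length_singleton, List.drop_succ_cons, List.drop_zero]
        rw [ih f (acc + 1) (by simp only [List.length_cons] at h; omega)]
        rw [List.count_cons_self]
        omega
      · rw [if_neg (by simp [List.isPrefixOf]; exact fun he => hq he.symm)]
        rw [ih f acc (by simp only [List.length_cons] at h; omega)]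
        rw [List.count_cons]
        simp [hq]

theorem pvStrCount (pattern : String) : PySem.Str.count pattern "?" = pattern.toList.count '?' := by
  show PySem.Chars.count pattern.toList "?".toList = _
  have : ("?".toList : List Char) = ['?'] := rfl
  rw [this, PySem.Chars.count]
  rw [if_neg (by simp)]
  rw [pvCount_go pattern.toList pattern.toList.length 0 le_rfl]
  omega

theorem pvD9_lt : pvD9.Pairwise (· < ·) := by
  unfold pvD9
  norm_num [List.pairwise_cons]
  decide

theorem pvD9_nodup : pvD9.Nodup := by
  unfold pvD9
  norm_num [List.nodup_cons]
  decide

theorem pvD9_ne : ∀ d ∈ pvD9, d ≠ '?' := by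
  intro d hd
  unfold pvD9 at hd
  fin_cases hd <;> decide

theorem pvAvailA (used : PySem.Set Char) :
    ((PySem.List.pyRange 1 10 1).filter (fun c => !(pvIntInCharSet c used))).map pvDigitChar
      = pvD9 := by
  have h : (PySem.List.pyRange 1 10 1).filter (fun c => !(pvIntInCharSet c used))
      = PySem.List.pyRange 1 10 1 :=
    List.filter_eq_self.mpr (fun a _ => by simp [pvIntInCharSet])
  rw [h]
  rfl

theorem pvUsedMem (cs : List Char) (d : Char) :
    d ∈ (PySem.Set.ofList (cs.filter (fun n => decide (n ≠ '?'))) : PySem.Set Char)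
      ↔ d ∈ cs ∧ d ≠ '?' := by
  rw [PySem.Set.mem_ofList]
  simp [List.mem_filter]

theorem pvAvailBMem (cs : List Char) (d : Char) :
    d ∈ "123456789".toList.filter (fun x => !(cs.contains x)) ↔ d ∈ pvD9 ∧ d ∉ cs := by
  have h9 : "123456789".toList = pvD9 := rfl
  rw [h9]
  simp [List.mem_filter]

theorem pvAvailBLt (cs : List Char) :
    ("123456789".toList.filter (fun x => !(cs.contains x))).Pairwise (· < ·) := by
  have h9 : "123456789".toList = pvD9 := rfl
  rw [h9]
  exact pvD9_lt.filter _

theorem pvFillAeqW (cs p : List Char) (h : ∀ d ∈ p, d ∉ cs) :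
    pvFillA cs p (PySem.Set.ofList (cs.filter (fun n => decide (n ≠ '?')))) 0 = pvFillW cs p := by
  have := pvFillA_success cs (PySem.Set.ofList (cs.filter (fun n => decide (n ≠ '?')))) p 0 ?_
  · simpa using this
  · intro d hd
    rcases List.mem_cons.mp hd with h1 | h2
    · subst h1
      intro hm
      exact ((pvUsedMem cs '?').mp hm).2 rfl
    · intro hm
      exact h d (by simpa using h2) ((pvUsedMem cs d).mp hm).1

theorem pvFilterChar (cs p : List Char) (hlen : p.length = cs.count '?')
    (hd9 : ∀ d ∈ p, d ∈ pvD9) :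
    ('?' ∉ pvFillA cs p (PySem.Set.ofList (cs.filter (fun n => decide (n ≠ '?')))) 0)
      ↔ ∀ d ∈ p, d ∉ cs := by
  constructor
  · intro h d hd
    by_contra hdc
    apply h
    apply pvFillA_fail cs _ p 0 (by simp [hlen])
    exact ⟨d, by simpa using hd, (pvUsedMem cs d).mpr ⟨hdc, pvD9_ne d (hd9 d hd)⟩⟩
  · intro h hq
    rw [pvFillAeqW cs p h] at hq
    exact pvFillW_no_q cs p (le_of_eq hlen.symm) (fun d hd => pvD9_ne d (hd9 d hd)) hq


theorem pvFold (cs : List Char) (states : List (List Char × List Char)) :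
    (cs.foldl pvStepB states).map Prod.fst
      = states.flatMap (fun s => (pvBuildB cs s.2).map (fun t => s.1 ++ t)) := by
  induction cs generalizing states with
  | nil =>
    simp only [List.foldl_nil]
    rw [show (fun s : List Char × List Char => (pvBuildB [] s.2).map (fun t => s.1 ++ t))
        = fun s => [s.1] from by funext st; simp [pvBuildB]]
    induction states with
    | nil => rfl
    | cons st rest ihs => simp [ihs]
  | cons c r ih =>
    rw [List.foldl_cons, ih]
    by_cases hc : c = '?'
    · subst hc
      rw [show pvStepB states '?'
          = states.flatMap (fun s => s.2.map (fun d => (s.1 ++ [d], s.2.filter (fun x => x ≠ d))))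
        from by simp [pvStepB]]
      rw [List.flatMap_assoc]
      congr 1
      funext st
      rw [List.flatMap_map]
      rw [show pvBuildB ('?' :: r) st.2
          = st.2.flatMap (fun d => (pvBuildB r (st.2.filter (fun x => x ≠ d))).map (fun s => d :: s))
        from by simp [pvBuildB]]
      rw [List.map_flatMap]
      congr 1
      funext d
      rw [List.map_map]
      refine List.map_congr_left ?_
      intro t _
      show st.1 ++ [d] ++ t = st.1 ++ d :: t
      exact (List.append_cons st.1 d t).symm
    · rw [show pvStepB states c = states.map (fun s => (s.1 ++ [c], s.2)) from by simp [pvStepB, hc]]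
      rw [List.flatMap_map]
      congr 1
      funext st
      rw [show pvBuildB (c :: r) st.2 = (pvBuildB r st.2).map (fun s => c :: s)
        from by simp [pvBuildB, hc]]
      rw [List.map_map]
      refine List.map_congr_left ?_
      intro t _
      show st.1 ++ [c] ++ t = st.1 ++ c :: t
      exact (List.append_cons st.1 c t).symm

theorem pvMain (pattern : String) : find_codes pattern = find_codes_alt pattern := by
  simp only [find_codes, find_codes_alt]
  by_cases hb : PySem.Str.count pattern "?" = 0
  · rw [if_pos hb]
    rw [pvStrCount] at hb
    have hnot : pattern.toList.contains '?' = false := by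
      simpa using List.count_eq_zero.mp hb
    rw [hnot]
    simp
  · rw [if_neg hb]
    rw [pvStrCount] at hb ⊢
    have hyes : pattern.toList.contains '?' = true := by
      have : '?' ∈ pattern.toList := List.count_pos_iff.mp (Nat.pos_of_ne_zero hb)
      simpa using this
    rw [hyes]
    rw [if_neg (by simp)]
    rw [pvFold]
    simp only [List.flatMap_cons, List.flatMap_nil, List.append_nil, List.nil_append,
      List.map_id']
    rw [pvAvailA]
    rw [PySem.List.foldl_append_ite
      (p := fun p => '?' ∉ pvFillA pattern.toList p
        (PySem.Set.ofList (pattern.toList.filter (fun n => decide (n ≠ '?')))) 0)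
      (f := fun p => String.ofList (pvFillA pattern.toList p
        (PySem.Set.ofList (pattern.toList.filter (fun n => decide (n ≠ '?')))) 0))]
    rw [List.nil_append]
    have hmemF : ∀ p, p ∈ (PySem.List.permutations pvD9 (pattern.toList.count '?')).filter
        (fun x => decide ('?' ∉ pvFillA pattern.toList x
          (PySem.Set.ofList (pattern.toList.filter (fun n => decide (n ≠ '?')))) 0)) ↔
        (p.length = pattern.toList.count '?' ∧ p.Nodup ∧ ∀ d ∈ p, d ∈ pvD9 ∧ d ∉ pattern.toList) := by
      intro p
      rw [List.mem_filter]
      rw [pvMem_perms _ _ _ pvD9_nodup]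
      constructor
      · rintro ⟨⟨hl, hnd, hmem⟩, hpred⟩
        rw [decide_eq_true_eq] at hpred
        have := (pvFilterChar pattern.toList p hl hmem).mp hpred
        exact ⟨hl, hnd, fun d hd => ⟨hmem d hd, this d hd⟩⟩
      · rintro ⟨hl, hnd, hmem⟩
        refine ⟨⟨hl, hnd, fun d hd => (hmem d hd).1⟩, ?_⟩
        rw [decide_eq_true_eq]
        exact (pvFilterChar pattern.toList p hl (fun d hd => (hmem d hd).1)).mpr
          (fun d hd => (hmem d hd).2)
    apply PySem.List.sorted_eq_of_perm_of_pairwise_lt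
    · -- the backtracking output is a permutation of A's kept-and-filled list
      have hBnd : ((pvBuildB pattern.toList
          ("123456789".toList.filter (fun d => !(pattern.toList.contains d)))).map
            String.ofList).Nodup := by
        refine List.Pairwise.imp (fun hab => ne_of_lt hab) ?_
        exact List.Pairwise.map _ (fun a b hab => by simpa using hab)
          (pvPairwise_buildB _ _ (pvAvailBLt pattern.toList))
      have hAnd : (((PySem.List.permutations pvD9 (pattern.toList.count '?')).filter
          (fun x => decide ('?' ∉ pvFillA pattern.toList x
            (PySem.Set.ofList (pattern.toList.filter (fun n => decide (n ≠ '?')))) 0))).map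
          (fun p => String.ofList (pvFillA pattern.toList p
            (PySem.Set.ofList (pattern.toList.filter (fun n => decide (n ≠ '?')))) 0))).Nodup := by
        refine List.Nodup.map_on ?_
          ((pvNodup_perms (pattern.toList.count '?') pvD9 pvD9_nodup).filter _)
        intro x hx y hy he
        obtain ⟨hxl, -, hxm⟩ := (hmemF x).mp hx
        obtain ⟨hyl, -, hym⟩ := (hmemF y).mp hy
        rw [pvFillAeqW _ _ (fun d hd => (hxm d hd).2),
          pvFillAeqW _ _ (fun d hd => (hym d hd).2), String.ofList_inj] at he
        exact pvFillW_inj pattern.toList x y hxl hyl he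
      refine (List.perm_ext_iff_of_nodup hBnd hAnd).mpr ?_
      intro s
      rw [List.mem_map, List.mem_map]
      constructor
      · rintro ⟨t, ht, rfl⟩
        obtain ⟨q, rfl, hl, hnd, hmem⟩ := (pvMem_buildB pattern.toList _
          (List.Pairwise.imp (fun hab => ne_of_lt hab) (pvAvailBLt pattern.toList)) t).mp ht
        have hq : ∀ d ∈ q, d ∈ pvD9 ∧ d ∉ pattern.toList :=
          fun d hd => (pvAvailBMem pattern.toList d).mp (hmem d hd)
        refine ⟨q, (hmemF q).mpr ⟨hl, hnd, hq⟩, ?_⟩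
        rw [pvFillAeqW _ _ (fun d hd => (hq d hd).2)]
      · rintro ⟨p, hp, rfl⟩
        obtain ⟨hl, hnd, hmem⟩ := (hmemF p).mp hp
        refine ⟨pvFillW pattern.toList p, ?_, ?_⟩
        · refine (pvMem_buildB pattern.toList _
            (List.Pairwise.imp (fun hab => ne_of_lt hab) (pvAvailBLt pattern.toList)) _).mpr
            ⟨p, rfl, hl, hnd, fun d hd => (pvAvailBMem pattern.toList d).mpr (hmem d hd)⟩
        · rw [pvFillAeqW _ _ (fun d hd => (hmem d hd).2)]
    · -- the backtracking output is strictly increasing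
      exact List.Pairwise.map _ (fun a b hab => by simpa using hab)
        (pvPairwise_buildB _ _ (pvAvailBLt pattern.toList))

-- ===== VERDICT (by name: the statement is the Claim_ definition above) =====
theorem find_codes_spec : Claim_equal_find_codes := by
  intro pattern _
  unfold Spec_find_codes
  exact pvMain pattern
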